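-- pv_equiv track=rewrite | github.com/BrianComposer/TransFolk | transfolk_tokenization/decoder.py | filer_tokens
-- ===== SOURCE A (Python) =====
-- def filer_tokens(tokens, patrones, ignore_case=True):
--     """
--     Elimina de 'tokens' los elementos que CONTENGAN cualquiera de las subcadenas en 'patrones'.
--     - tokens: lista de strings
--     - patrones: lista de strings a bloquear (p. ej. ["BAR", "MOD"])
--     - ignore_case: si True, compara sin distinguir mayúsculas/minúsculas
--     """
--     if ignore_case:
--         patrones_norm = [p.lower() for p in patrones]
--         def contiene_patron(t):
--             tl = t.lower()
--             return any(p in tl for p in patrones_norm)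
--     else:
--         def contiene_patron(t):
--             return any(p in t for p in patrones)
--
--     return [t for t in tokens if not contiene_patron(t)]
-- ===== SOURCE B (Python) =====
-- def filer_tokens(tokens, patrones, ignore_case=True):
--     # Pattern-outer successive filtering over (token, search-key) pairs:
--     # normalize each token's key once, then peel off one pattern per pass.
--     pairs = [(t, t.lower() if ignore_case else t) for t in tokens]
--     for p in patrones:
--         if ignore_case:
--             p = p.lower()
--         pairs = [(t, k) for (t, k) in pairs if p not in k]
--     return [t for (t, _) in pairs]
-- ===== Notes on version B (the rewrite author's own statement) =====
-- stated objective: alternative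
-- what changed: Instead of testing every pattern inside a per-token any(), B normalizes tokens once into (token,key) pairs and makes one filtering pass per pattern over the surviving pairs, returning the surviving tokens.
import Mathlib
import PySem

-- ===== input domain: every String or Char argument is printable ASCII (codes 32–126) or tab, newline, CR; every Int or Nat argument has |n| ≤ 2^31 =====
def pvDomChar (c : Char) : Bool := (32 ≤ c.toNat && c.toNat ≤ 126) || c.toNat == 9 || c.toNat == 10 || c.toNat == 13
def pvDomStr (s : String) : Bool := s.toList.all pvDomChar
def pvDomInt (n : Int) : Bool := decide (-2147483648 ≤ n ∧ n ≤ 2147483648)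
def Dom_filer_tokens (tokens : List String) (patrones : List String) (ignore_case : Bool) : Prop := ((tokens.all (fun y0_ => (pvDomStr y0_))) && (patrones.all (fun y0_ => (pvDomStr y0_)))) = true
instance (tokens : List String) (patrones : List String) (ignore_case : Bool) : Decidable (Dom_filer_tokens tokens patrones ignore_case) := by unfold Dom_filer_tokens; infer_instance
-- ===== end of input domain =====

-- B replaces A's per-token any-over-patterns test with one filtering pass per pattern over (token, normalized-key) pairs; objective: alternative (same cost).


-- ===== PORT A =====
def filer_tokens (tokens : List String) (patrones : List String) (ignore_case : Bool) : List String :=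
  if ignore_case then
    let patrones_norm := patrones.map (fun p => PySem.Str.lower p)
    tokens.filter (fun t =>
      !(patrones_norm.any (fun p => PySem.Str.isIn p (PySem.Str.lower t))))
  else
    tokens.filter (fun t => !(patrones.any (fun p => PySem.Str.isIn p t)))

-- ===== PORT B =====
def filer_tokens_alt (tokens : List String) (patrones : List String) (ignore_case : Bool) : List String :=
  let pairs := tokens.map (fun t => (t, if ignore_case then PySem.Str.lower t else t))
  let survivors := patrones.foldl
    (fun pr p =>
      let p' := if ignore_case then PySem.Str.lower p else p
      pr.filter (fun tk => !(PySem.Str.isIn p' tk.2)))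
    pairs
  survivors.map Prod.fst

-- ===== PRECONDITION & SPEC =====
def Spec_filer_tokens (tokens : List String) (patrones : List String) (ignore_case : Bool) (out : List String) : Prop := out = filer_tokens_alt tokens patrones ignore_case
instance (tokens : List String) (patrones : List String) (ignore_case : Bool) (out : List String) : Decidable (Spec_filer_tokens tokens patrones ignore_case out) := by unfold Spec_filer_tokens; infer_instance

-- ===== CLAIM (what is proved, stated in full; the proofs are below) =====
def Claim_equal_filer_tokens : Prop := ∀ (tokens : List String) (patrones : List String) (ignore_case : Bool), Dom_filer_tokens tokens patrones ignore_case → Spec_filer_tokens tokens patrones ignore_case (filer_tokens tokens patrones ignore_case)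

-- ===== LEMMAS AND PROOFS =====

-- ===== VERDICT (by name: the statement is the Claim_ definition above) =====
-- Successive filtering by each pattern equals one filter by "no pattern matches".
theorem foldl_filter_eq_filter_any {α β : Type} (f : β → α → Bool) (ps : List β) (l : List α) :
    ps.foldl (fun acc p => acc.filter (fun x => !(f p x))) l
      = l.filter (fun x => !(ps.any (fun p => f p x))) := by
  induction ps generalizing l with
  | nil => simp
  | cons p ps ih =>
      simp only [List.foldl_cons, ih, List.filter_filter]
      congr 1
      funext x
      cases h : f p x <;> cases h2 : ps.any (fun p => f p x) <;> simp [h, h2]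

theorem filter_map_comm {α β : Type} (g : α → β) (q : β → Bool) (l : List α) :
    (l.map g).filter q = (l.filter (fun x => q (g x))).map g := by
  induction l with
  | nil => rfl
  | cons a l ih => by_cases h : q (g a) <;> simp [h, ih]

theorem filer_tokens_spec : Claim_equal_filer_tokens := by
  intro tokens patrones ic _
  unfold Spec_filer_tokens filer_tokens filer_tokens_alt
  dsimp only
  rw [foldl_filter_eq_filter_any (fun (p : String) (tk : String × String) => PySem.Str.isIn (if ic = true then PySem.Str.lower p else p) tk.2), filter_map_comm]
  cases ic <;> simp [List.any_map, Function.comp_def, PySem.Str.lower]
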